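-- pv_equiv track=rewrite | github.com/omarkhaled1853/Connect-4-AI | ConnectFourGUI/turn_gain.py | num_of_connect4_in_neg_diagonal
-- ===== SOURCE A (Python) =====
-- ROW_COUNT = 6
--
-- COLUMN_COUNT = 7
--
-- def num_of_connect4_in_neg_diagonal(board, row, col, piece):
--     while row > 0 and col < COLUMN_COUNT - 1:
--         row -= 1
--         col += 1
--
--     count = 0
--     while row + 3 < ROW_COUNT and col - 3 >= 0:
--         if board[row][col] == piece and board[row + 1][col - 1] == piece and board[row + 2][col - 2] == piece and board[row + 3][col - 3] == piece:
--             count += 1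
--         row += 1
--         col -= 1
--
--     return count
-- ===== SOURCE B (Python) =====
-- ROW_COUNT = 6
--
-- COLUMN_COUNT = 7
--
-- def num_of_connect4_in_neg_diagonal(board, row, col, piece):
--     # jump straight to the top-right end of the anti-diagonal (closed form)
--     step = min(row, COLUMN_COUNT - 1 - col)
--     if step > 0:
--         row -= step
--         col += step
--     # number of 4-windows that fit down-left from (row, col)
--     n = min(ROW_COUNT - 3 - row, col - 2)
--     if n <= 0:
--         return 0
--     diag = [board[row + i][col - i] for i in range(n + 3)]
--     count = 0
--     run = 0
--     for x in diag:
--         run = run + 1 if x == piece else 0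
--         if run >= 4:
--             count += 1
--     return count
-- ===== Notes on version B (the rewrite author's own statement) =====
-- stated objective: alternative
-- what changed: B replaces A's two while-loops by a closed-form jump to the top-right end of the anti-diagonal and a closed-form window count n, gathers the n+3 diagonal cells once, and counts connect-4s with a single run-length pass (run>=4) instead of testing four board cells per window.
-- outside the precondition, e.g. on num_of_connect4_in_neg_diagonal([[5, 5, 5, 5, 5, 5, 5]], -1, 3, 0): A returns 0, B raises IndexError; on num_of_connect4_in_neg_diagonal([[0, 0, 0, 0]], 0, 3, 1): A returns 0, B raises IndexError
import Mathlib
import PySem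

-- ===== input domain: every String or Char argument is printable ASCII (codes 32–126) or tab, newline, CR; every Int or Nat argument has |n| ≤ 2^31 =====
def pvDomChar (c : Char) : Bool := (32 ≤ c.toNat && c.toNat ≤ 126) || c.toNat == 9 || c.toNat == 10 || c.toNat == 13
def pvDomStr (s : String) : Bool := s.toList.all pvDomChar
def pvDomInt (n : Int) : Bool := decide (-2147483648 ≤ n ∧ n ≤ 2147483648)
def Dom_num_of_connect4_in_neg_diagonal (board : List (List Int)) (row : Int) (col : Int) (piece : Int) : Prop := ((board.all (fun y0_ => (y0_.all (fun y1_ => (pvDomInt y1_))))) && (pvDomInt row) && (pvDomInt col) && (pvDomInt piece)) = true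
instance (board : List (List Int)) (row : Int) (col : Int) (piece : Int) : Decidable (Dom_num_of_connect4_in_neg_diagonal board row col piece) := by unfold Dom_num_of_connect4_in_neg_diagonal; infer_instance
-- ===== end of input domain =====

-- B replaces A's climb loop by closed-form arithmetic and the per-window 4-cell test by a single
-- run-length pass over the gathered diagonal (an alternative algorithm, same measured cost).

-- ===== PORT A =====
-- the first while-loop: climb to the top-right end of the anti-diagonal
def pvClimbA (row col : Int) : Int × Int :=
  if _h : row > 0 ∧ col < 7 - 1 then pvClimbA (row - 1) (col + 1) else (row, col)
termination_by row.toNat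
decreasing_by omega

-- board[r][c] (in range under Pre_; pyGetD is exact there)
def pvCellA (board : List (List Int)) (r c : Int) : Int :=
  PySem.List.pyGetD (PySem.List.pyGetD board r []) c 0

-- the second while-loop of A
def pvLoopA (board : List (List Int)) (piece row col count : Int) : Int :=
  if _h : row + 3 < 6 ∧ col - 3 ≥ 0 then
    pvLoopA board piece (row + 1) (col - 1)
      (if pvCellA board row col = piece ∧ pvCellA board (row + 1) (col - 1) = piece ∧
          pvCellA board (row + 2) (col - 2) = piece ∧ pvCellA board (row + 3) (col - 3) = piece
       then count + 1 else count)
  else count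
termination_by (3 - row).toNat
decreasing_by omega

def num_of_connect4_in_neg_diagonal (board : List (List Int)) (row : Int) (col : Int) (piece : Int) : Int :=
  let rc := pvClimbA row col
  pvLoopA board piece rc.1 rc.2 0

-- ===== PORT B =====
def num_of_connect4_in_neg_diagonal_alt (board : List (List Int)) (row : Int) (col : Int) (piece : Int) : Int :=
  let step := min row (7 - 1 - col)
  let rc := if step > 0 then (row - step, col + step) else (row, col)
  let n := min (6 - 3 - rc.1) (rc.2 - 2)
  if n ≤ 0 then 0
  else
    let diag := (PySem.List.pyRange 0 (n + 3) 1).map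
      (fun i => PySem.List.pyGetD (PySem.List.pyGetD board (rc.1 + i) []) (rc.2 - i) 0)
    (diag.foldl
      (fun (acc : Int × Int) x =>
        let run := if x = piece then acc.2 + 1 else 0
        (if run ≥ 4 then acc.1 + 1 else acc.1, run)) (0, 0)).1

-- ===== PRECONDITION & SPEC =====
-- Pre_ excludes inputs whose scanned diagonal segment is not entirely inside the board: there A
-- either raises IndexError, or returns a value that depends on accidental negative-index
-- wraparound or on short-circuiting past an out-of-range cell (B raises on those inputs).
def Pre_num_of_connect4_in_neg_diagonal (board : List (List Int)) (row : Int) (col : Int) (piece : Int) : Prop :=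
  let t := max 0 (min row (6 - col))
  let r0 := row - t
  let c0 := col + t
  let m := min (3 - r0) (c0 - 2)
  m ≤ 0 ∨ ∀ j ∈ List.range (m + 3).toNat,
      0 ≤ r0 + (j : Int) ∧ r0 + (j : Int) < board.length ∧
      0 ≤ c0 - (j : Int) ∧ c0 - (j : Int) < (board.getD (r0 + (j : Int)).toNat []).length
instance (board : List (List Int)) (row : Int) (col : Int) (piece : Int) : Decidable (Pre_num_of_connect4_in_neg_diagonal board row col piece) := by unfold Pre_num_of_connect4_in_neg_diagonal; infer_instance

def pvWitness_num_of_connect4_in_neg_diagonal : List (List Int) × Int × Int × Int :=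
  ([[0,0,0,0,0,0,0],[0,0,0,0,0,0,0],[0,0,0,0,0,0,0],[0,0,0,0,0,0,0],[0,0,0,0,0,0,0],[0,0,0,0,0,0,0]], 5, 0, 1)

def Spec_num_of_connect4_in_neg_diagonal (board : List (List Int)) (row : Int) (col : Int) (piece : Int) (out : Int) : Prop := out = num_of_connect4_in_neg_diagonal_alt board row col piece
instance (board : List (List Int)) (row : Int) (col : Int) (piece : Int) (out : Int) : Decidable (Spec_num_of_connect4_in_neg_diagonal board row col piece out) := by unfold Spec_num_of_connect4_in_neg_diagonal; infer_instance

-- ===== CLAIM (what is proved, stated in full; the proofs are below) =====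
def Claim_equal_num_of_connect4_in_neg_diagonal : Prop := ∀ (board : List (List Int)) (row : Int) (col : Int) (piece : Int), Dom_num_of_connect4_in_neg_diagonal board row col piece → Pre_num_of_connect4_in_neg_diagonal board row col piece → Spec_num_of_connect4_in_neg_diagonal board row col piece (num_of_connect4_in_neg_diagonal board row col piece)

-- ===== LEMMAS AND PROOFS =====

theorem pvClimbA_eq (row col : Int) :
    pvClimbA row col =
      (row - max 0 (min row (6 - col)), col + max 0 (min row (6 - col))) := by
  fun_induction pvClimbA with
  | case1 row col h ih =>
    rw [ih]
    have : max 0 (min (row - 1) (6 - (col + 1))) = max 0 (min row (6 - col)) - 1 := by omega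
    rw [this, Prod.mk.injEq]; exact ⟨by ring, by ring⟩
  | case2 row col h =>
    have : max 0 (min row (6 - col)) = 0 := by omega
    rw [this]; simp

def pvWin (board : List (List Int)) (piece r c : Int) (j : Nat) : Bool :=
  decide (pvCellA board (r + (j : Int)) (c - (j : Int)) = piece ∧
    pvCellA board (r + (j : Int) + 1) (c - (j : Int) - 1) = piece ∧
    pvCellA board (r + (j : Int) + 2) (c - (j : Int) - 2) = piece ∧
    pvCellA board (r + (j : Int) + 3) (c - (j : Int) - 3) = piece)

theorem pvWin_shift (board : List (List Int)) (piece r c : Int) (j : Nat) :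
    pvWin board piece (r + 1) (c - 1) j = pvWin board piece r c (j + 1) := by
  unfold pvWin
  push_cast
  ring_nf

theorem pvLoopA_eq (board : List (List Int)) (piece : Int) (k : Nat) :
    ∀ (r c acc : Int), (min (3 - r) (c - 2)).toNat = k →
      pvLoopA board piece r c acc =
        acc + ((List.range k).countP (pvWin board piece r c) : Int) := by
  induction k with
  | zero =>
    intro r c acc h
    rw [pvLoopA, dif_neg (by omega)]
    simp
  | succ k ih =>
    intro r c acc h
    rw [pvLoopA, dif_pos (by omega)]
    rw [ih (r + 1) (c - 1) _ (by omega)]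
    have hw : (List.range k).countP (pvWin board piece (r + 1) (c - 1)) =
        (List.range k).countP (fun j => pvWin board piece r c (j + 1)) := by
      apply List.countP_congr
      intro j _
      rw [pvWin_shift]
    rw [hw]
    rw [List.range_succ_eq_map, List.countP_cons, List.countP_map]
    simp only [Function.comp_def, Nat.succ_eq_add_one]
    have h0 : (pvWin board piece r c 0 = true) ↔
        (pvCellA board r c = piece ∧ pvCellA board (r + 1) (c - 1) = piece ∧
          pvCellA board (r + 2) (c - 2) = piece ∧ pvCellA board (r + 3) (c - 3) = piece) := by
      simp [pvWin]
    by_cases hc : pvCellA board r c = piece ∧ pvCellA board (r + 1) (c - 1) = piece ∧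
        pvCellA board (r + 2) (c - 2) = piece ∧ pvCellA board (r + 3) (c - 3) = piece
    · rw [if_pos hc, if_pos (h0.mpr hc)]; push_cast; ring
    · rw [if_neg hc, if_neg (fun hh => hc (h0.mp hh))]; push_cast; ring

-- length of the maximal run of `p`-cells of `g` ending at index i
def pvStreak (g : Nat → Int) (p : Int) : Nat → Nat
  | 0 => if g 0 = p then 1 else 0
  | (i + 1) => if g (i + 1) = p then pvStreak g p i + 1 else 0

theorem pvFold_eq (g : Nat → Int) (p : Int) (L : Nat) :
    ((List.range L).map g).foldl
      (fun (acc : Int × Int) x =>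
        let run := if x = p then acc.2 + 1 else 0
        (if run ≥ 4 then acc.1 + 1 else acc.1, run)) (0, 0) =
      (((List.range L).countP (fun i => decide (4 ≤ pvStreak g p i)) : Int),
       if L = 0 then 0 else (pvStreak g p (L - 1) : Int)) := by
  induction L with
  | zero => simp
  | succ L ih =>
    rw [List.range_succ, List.map_append, List.foldl_append, ih]
    simp only [List.map_cons, List.map_nil, List.foldl_cons, List.foldl_nil]
    have hrun : (if g L = p then (if L = 0 then (0:Int) else (pvStreak g p (L - 1) : Int)) + 1 else 0) =
        (pvStreak g p L : Int) := by
      cases L with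
      | zero => simp only [if_true]; rw [pvStreak]; split_ifs <;> simp_all
      | succ n =>
        simp only [Nat.succ_ne_zero, if_false, Nat.add_sub_cancel]
        rw [pvStreak]
        split_ifs <;> (push_cast; try ring_nf)
    rw [List.countP_append]
    simp only [List.countP_cons, List.countP_nil]
    rw [Prod.mk.injEq]
    constructor
    · simp only [hrun]
      by_cases h4 : 4 ≤ pvStreak g p L
      · rw [if_pos (by exact_mod_cast h4), decide_eq_true h4]
        simp only [if_true]; omega
      · rw [if_neg (by exact_mod_cast h4), decide_eq_false h4]
        simp
    · simp only [hrun, Nat.succ_ne_zero, if_false, Nat.add_sub_cancel]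

theorem pvStreak_ge (g : Nat → Int) (p : Int) :
    ∀ (i : Nat) (s : Nat), s ≤ pvStreak g p i ↔ (s ≤ i + 1 ∧ ∀ t < s, g (i - t) = p) := by
  intro i
  induction i with
  | zero =>
    intro s
    rw [pvStreak]
    split_ifs with h
    · constructor
      · intro hs
        refine ⟨by omega, ?_⟩
        intro t ht
        have : t = 0 := by omega
        simpa [this]
      · rintro ⟨h1, _⟩; omega
    · constructor
      · intro hs
        have : s = 0 := by omega
        simp [this]
      · rintro ⟨h1, h2⟩
        by_contra hc
        exact h (by simpa using h2 0 (by omega))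
  | succ i ih =>
    intro s
    rw [pvStreak]
    split_ifs with h
    · cases s with
      | zero => simp
      | succ s =>
        rw [Nat.succ_le_succ_iff, ih s]
        constructor
        · rintro ⟨h1, h2⟩
          refine ⟨by omega, ?_⟩
          intro t ht
          cases t with
          | zero => simpa
          | succ t =>
            have := h2 t (by omega)
            have harr : i + 1 - (t + 1) = i - t := by omega
            rwa [harr]
        · rintro ⟨h1, h2⟩
          refine ⟨by omega, ?_⟩
          intro t ht
          have := h2 (t + 1) (by omega)
          have harr : i + 1 - (t + 1) = i - t := by omega
          rwa [harr] at this
    · constructor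
      · intro hs
        have : s = 0 := by omega
        simp [this]
      · rintro ⟨h1, h2⟩
        by_contra hc
        have hs : 1 ≤ s := by omega
        exact h (by simpa using h2 0 (by omega))

theorem pvCount_run_eq_win (g : Nat → Int) (p : Int) (m : Nat) :
    (List.range (m + 3)).countP (fun i => decide (4 ≤ pvStreak g p i)) =
      (List.range m).countP (fun j =>
        decide (g j = p ∧ g (j + 1) = p ∧ g (j + 2) = p ∧ g (j + 3) = p)) := by
  have hsplit : List.range (m + 3) = List.range 3 ++ (List.range m).map (fun j => 3 + j) := by
    rw [Nat.add_comm m 3, List.range_add]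
  rw [hsplit, List.countP_append, List.countP_map]
  have h3 : (List.range 3).countP (fun i => decide (4 ≤ pvStreak g p i)) = 0 := by
    rw [List.countP_eq_zero]
    intro i hi
    simp only [List.mem_range] at hi
    have h := ((pvStreak_ge g p i (pvStreak g p i)).mp le_rfl).1
    simp only [decide_eq_true_eq]
    omega
  rw [h3, Nat.zero_add]
  apply List.countP_congr
  intro j _
  simp only [Function.comp_def]
  simp only [decide_eq_true_eq]
  rw [pvStreak_ge g p (3 + j) 4]
  constructor
  · rintro ⟨-, h2⟩
    refine ⟨?_, ?_, ?_, ?_⟩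
    · have := h2 3 (by omega); simpa using this
    · have := h2 2 (by omega); rw [show 3 + j - 2 = j + 1 by omega] at this; exact this
    · have := h2 1 (by omega); rw [show 3 + j - 1 = j + 2 by omega] at this; exact this
    · have := h2 0 (by omega); rw [show 3 + j - 0 = j + 3 by omega] at this; exact this
  · rintro ⟨h0, h1', h2', h3'⟩
    refine ⟨by omega, ?_⟩
    intro t ht
    interval_cases t
    · rw [show 3 + j - 0 = j + 3 by omega]; exact h3'
    · rw [show 3 + j - 1 = j + 2 by omega]; exact h2'
    · rw [show 3 + j - 2 = j + 1 by omega]; exact h1'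
    · rw [show 3 + j - 3 = j by omega]; exact h0


-- characterisation of port A: windows counted from the climb end
theorem pvA_char (board : List (List Int)) (row col piece : Int) :
    num_of_connect4_in_neg_diagonal board row col piece =
      (((List.range (min (3 - (row - max 0 (min row (6 - col)))) ((col + max 0 (min row (6 - col))) - 2)).toNat).countP
        (pvWin board piece (row - max 0 (min row (6 - col))) (col + max 0 (min row (6 - col)))) : Int)) := by
  unfold num_of_connect4_in_neg_diagonal
  rw [pvClimbA_eq]
  rw [pvLoopA_eq board piece _ _ _ _ rfl]
  simp

-- characterisation of port B: the same count
theorem pvB_char (board : List (List Int)) (row col piece : Int) :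
    num_of_connect4_in_neg_diagonal_alt board row col piece =
      (((List.range (min (3 - (row - max 0 (min row (6 - col)))) ((col + max 0 (min row (6 - col))) - 2)).toNat).countP
        (pvWin board piece (row - max 0 (min row (6 - col))) (col + max 0 (min row (6 - col)))) : Int)) := by
  unfold num_of_connect4_in_neg_diagonal_alt
  simp only []
  have hrc : (if min row (7 - 1 - col) > 0 then (row - min row (7 - 1 - col), col + min row (7 - 1 - col)) else (row, col))
      = (row - max 0 (min row (6 - col)), col + max 0 (min row (6 - col))) := by
    split_ifs with h <;> rw [Prod.mk.injEq] <;> constructor <;> omega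
  rw [hrc]
  have hm : min (6 - 3 - (row - max 0 (min row (6 - col)))) ((col + max 0 (min row (6 - col))) - 2)
      = min (3 - (row - max 0 (min row (6 - col)))) ((col + max 0 (min row (6 - col))) - 2) := by
    norm_num
  rw [hm]
  set r0 := row - max 0 (min row (6 - col)) with hr0
  set c0 := col + max 0 (min row (6 - col)) with hc0
  set m := min (3 - r0) (c0 - 2) with hmdef
  by_cases h : m ≤ 0
  · rw [if_pos h]
    have : m.toNat = 0 := by omega
    rw [this]
    simp
  · rw [if_neg h]
    rw [PySem.List.pyRange_one]
    have h3 : (m + 3 - 0).toNat = m.toNat + 3 := by omega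
    rw [h3, List.map_map]
    have hfun : ((fun i => PySem.List.pyGetD (PySem.List.pyGetD board (r0 + i) []) (c0 - i) 0) ∘ (fun k : Nat => 0 + (k : Int)))
        = (fun k : Nat => pvCellA board (r0 + (k : Int)) (c0 - (k : Int))) := by
      funext k; simp [pvCellA]
    rw [hfun, pvFold_eq _ piece (m.toNat + 3), pvCount_run_eq_win]
    norm_num
    apply List.countP_congr
    intro j _
    simp only [pvWin, pvCellA, decide_eq_true_eq]
    ring_nf
    simp

-- ===== VERDICT (by name: the statement is the Claim_ definition above) =====
theorem num_of_connect4_in_neg_diagonal_spec : Claim_equal_num_of_connect4_in_neg_diagonal := by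
  intro board row col piece _hdom _hpre
  unfold Spec_num_of_connect4_in_neg_diagonal
  rw [pvA_char, pvB_char]
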